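-- pv_equiv track=rewrite | github.com/chelokot/secp256k1-quantum-circuits | compiler_verification_project/src/subcircuit_equivalence.py | _bit_ripple_sub
-- ===== SOURCE A (Python) =====
-- def _bit_ripple_sub(width: int, left: int, right: int) -> int:
--     borrow = 0
--     out = 0
--     for bit_index in range(width):
--         left_bit = (left >> bit_index) & 1
--         right_bit = (right >> bit_index) & 1
--         diff_bit = left_bit ^ right_bit ^ borrow
--         borrow = ((1 - left_bit) & (right_bit | borrow)) | (right_bit & borrow)
--         out |= diff_bit << bit_index
--     return out & ((1 << width) - 1)
-- ===== SOURCE B (Python) =====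
-- def _bit_ripple_sub(width: int, left: int, right: int) -> int:
--     return (left - right) % (1 << width)
-- ===== Notes on version B (the rewrite author's own statement) =====
-- stated objective: faster
-- what changed: Replaces the bit-by-bit ripple-borrow loop (per-bit extract, xor, borrow propagation, or-accumulate) with the single big-int modular reduction (left - right) % (1 << width); intended as faster (O(width) loop iterations vs O(1) big-int ops); a timing run measured B 153x faster at n=65536 but could not finish decoding at the largest size, so the label is unconfirmed there.
import Mathlib
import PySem

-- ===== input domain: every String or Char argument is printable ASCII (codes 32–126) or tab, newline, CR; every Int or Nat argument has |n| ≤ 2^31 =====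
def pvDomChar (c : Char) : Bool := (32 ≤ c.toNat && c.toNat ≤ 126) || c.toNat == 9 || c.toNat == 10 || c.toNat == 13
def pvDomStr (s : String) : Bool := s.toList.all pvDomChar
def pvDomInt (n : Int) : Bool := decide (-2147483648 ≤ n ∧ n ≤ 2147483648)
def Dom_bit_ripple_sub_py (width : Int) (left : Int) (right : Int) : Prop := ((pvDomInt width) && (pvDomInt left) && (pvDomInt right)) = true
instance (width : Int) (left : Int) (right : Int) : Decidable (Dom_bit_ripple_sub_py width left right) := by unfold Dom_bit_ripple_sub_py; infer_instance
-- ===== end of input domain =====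

-- B replaces A's bit-by-bit ripple-borrow loop by the single modular reduction (left - right) % (1 << width); intended as faster (measured 153x at n=65536 in a timing run; unconfirmed at the largest size).


-- ===== PORT A =====
-- Loop body of A; the state is the pair (borrow, out).  bit_index comes from range(width), so it is ≥ 0
-- and '.toNat' is exact; Python's '>>', '<<', '&', '|', '^' are Lean's '>>>', '<<<' and PySem's band/bor/bxor.
def rippleStep (left : Int) (right : Int) (st : Int × Int) (bit_index : Int) : Int × Int :=
  let left_bit := PySem.Int.band (left >>> bit_index.toNat) 1
  let right_bit := PySem.Int.band (right >>> bit_index.toNat) 1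
  let diff_bit := PySem.Int.bxor (PySem.Int.bxor left_bit right_bit) st.1
  let borrow := PySem.Int.bor (PySem.Int.band (1 - left_bit) (PySem.Int.bor right_bit st.1)) (PySem.Int.band right_bit st.1)
  (borrow, PySem.Int.bor st.2 (diff_bit <<< bit_index.toNat))

-- Python's '1 << width' raises ValueError for width < 0; Pre_ below restricts to 0 ≤ width, where '.toNat' is exact.
def bit_ripple_sub_py (width : Int) (left : Int) (right : Int) : Int :=
  PySem.Int.band ((PySem.List.pyRange 0 width 1).foldl (rippleStep left right) (0, 0)).2
    (((1:Int) <<< width.toNat) - 1)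

-- ===== PORT B =====
-- Source B: return (left - right) % (1 << width); '%' with the positive modulus 1 << width is PySem.Int.mod.
def bit_ripple_sub_py_alt (width : Int) (left : Int) (right : Int) : Int :=
  PySem.Int.mod (left - right) ((1:Int) <<< width.toNat)

-- ===== PRECONDITION & SPEC =====
-- Pre_ excludes exactly width < 0, where Python's '1 << width' raises ValueError in both A and B.
def Pre_bit_ripple_sub_py (width : Int) (left : Int) (right : Int) : Prop := 0 ≤ width
instance (width : Int) (left : Int) (right : Int) : Decidable (Pre_bit_ripple_sub_py width left right) := by unfold Pre_bit_ripple_sub_py; infer_instance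

def pvWitness_bit_ripple_sub_py : Int × Int × Int := (4, 5, 3)

def Spec_bit_ripple_sub_py (width : Int) (left : Int) (right : Int) (out : Int) : Prop := out = bit_ripple_sub_py_alt width left right
instance (width : Int) (left : Int) (right : Int) (out : Int) : Decidable (Spec_bit_ripple_sub_py width left right out) := by unfold Spec_bit_ripple_sub_py; infer_instance

-- ===== CLAIM (what is proved, stated in full; the proofs are below) =====
def Claim_equal_bit_ripple_sub_py : Prop := ∀ (width : Int) (left : Int) (right : Int), Dom_bit_ripple_sub_py width left right → Pre_bit_ripple_sub_py width left right → Spec_bit_ripple_sub_py width left right (bit_ripple_sub_py width left right)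

-- ===== LEMMAS AND PROOFS =====

-- borrow out of the low n bits of left - right
def borrowAt (left : Int) (right : Int) (n : Nat) : Int :=
  if left % 2 ^ n < right % 2 ^ n then 1 else 0

theorem nat_lor_two_pow (x n : Nat) (h : x < 2 ^ n) : x ||| 2 ^ n = x + 2 ^ n := by
  apply Nat.eq_of_testBit_eq
  intro k
  rcases lt_trichotomy k n with hk | hk | hk
  · rw [Nat.testBit_lor, Nat.testBit_two_pow_of_ne (by omega), Nat.add_comm, Nat.testBit_two_pow_add_gt hk]
    simp
  · subst hk
    rw [Nat.testBit_lor, Nat.testBit_two_pow_self, Nat.add_comm, Nat.testBit_two_pow_add_eq]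
    simp [Nat.testBit_lt_two_pow h]
  · rw [Nat.testBit_lor, Nat.testBit_two_pow_of_ne (by omega)]
    have h2 : x + 2 ^ n < 2 ^ (n + 1) := by have := Nat.two_pow_pos n; omega
    rw [Nat.testBit_lt_two_pow (Nat.lt_of_lt_of_le h2 (Nat.pow_le_pow_right (by norm_num) (by omega))),
        Nat.testBit_lt_two_pow (by have := Nat.lt_of_lt_of_le h2 (Nat.pow_le_pow_right (by norm_num) hk); omega)]
    simp

-- Int '|' of a value below 2^n with the single bit 2^n is addition.
theorem int_bor_two_pow (o : Int) (n : Nat) (h0 : 0 ≤ o) (h : o < 2 ^ n) :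
    PySem.Int.bor o (2 ^ n) = o + 2 ^ n := by
  rw [PySem.Int.bor_of_nonneg h0 (by positivity)]
  have hc : ((2:Int) ^ n) = ((2 ^ n : Nat) : Int) := by push_cast; ring
  rw [hc, Int.toNat_natCast, nat_lor_two_pow o.toNat n (by omega)]
  push_cast
  omega

-- Int '&' with the mask 2^n - 1 is the identity on [0, 2^n).
theorem int_band_mask (x : Int) (n : Nat) (h0 : 0 ≤ x) (h : x < 2 ^ n) :
    PySem.Int.band x (2 ^ n - 1) = x := by
  have hp := Nat.two_pow_pos n
  have hc : ((2:Int) ^ n - 1) = ((2 ^ n - 1 : Nat) : Int) := by push_cast [hp]; ring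
  rw [PySem.Int.band_of_nonneg h0 (by omega), hc, Int.toNat_natCast,
    Nat.and_two_pow_sub_one_eq_mod, Nat.mod_eq_of_lt (by omega), Int.toNat_of_nonneg h0]

-- split the low n+1 bits into the low n bits plus bit n
theorem emod_pow_succ (a : Int) (n : Nat) :
    a % 2 ^ (n + 1) = a % 2 ^ n + (a / 2 ^ n % 2) * 2 ^ n := by
  have hm : (0:Int) < 2 ^ n := by positivity
  have hsplit : a = a / 2 ^ n % 2 * 2 ^ n + a % 2 ^ n + 2 ^ (n + 1) * (a / 2 ^ n / 2) := by
    have h1 := Int.emod_add_ediv a (2 ^ n)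
    have h3 : a / 2 ^ n = a / 2 ^ n % 2 + 2 * (a / 2 ^ n / 2) := by omega
    linear_combination (-1 : Int) * h1 + (2:Int) ^ n * h3
  have key : a % 2 ^ (n + 1) = (a / 2 ^ n % 2 * 2 ^ n + a % 2 ^ n) % 2 ^ (n + 1) := by
    conv_lhs => rw [hsplit]
    rw [Int.add_mul_emod_self_left]
  have hr0 := Int.emod_nonneg a (by positivity : (2:Int) ^ n ≠ 0)
  have hr1 := Int.emod_lt_of_pos a hm
  rcases Int.emod_two_eq (a / 2 ^ n) with h | h <;>
    rw [key, h, Int.emod_eq_of_lt (by omega) (by rw [pow_succ]; omega)] <;> ring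

-- characterisation of (x - y) % 2^n by the low-bit remainders and the borrow
theorem emod_sub_char (x y : Int) (n : Nat) :
    (x - y) % 2 ^ n = x % 2 ^ n - y % 2 ^ n + borrowAt x y n * 2 ^ n := by
  have hm : (0:Int) < 2 ^ n := by positivity
  have hx0 := Int.emod_nonneg x (by positivity : (2:Int) ^ n ≠ 0)
  have hx1 := Int.emod_lt_of_pos x hm
  have hy0 := Int.emod_nonneg y (by positivity : (2:Int) ^ n ≠ 0)
  have hy1 := Int.emod_lt_of_pos y hm
  rw [Int.sub_emod, borrowAt]
  split_ifs with h
  · rw [show x % 2 ^ n - y % 2 ^ n = x % 2 ^ n - y % 2 ^ n + 2 ^ n * 1 - 2 ^ n * 1 by ring]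
    rw [sub_eq_add_neg (x % 2 ^ n - y % 2 ^ n + 2 ^ n * 1), show -(2 ^ n * 1 : Int) = 2 ^ n * (-1) by ring,
        Int.add_mul_emod_self_left, Int.emod_eq_of_lt (by omega) (by omega)]
    ring
  · rw [Int.emod_eq_of_lt (by omega) (by omega)]
    ring

theorem step_closed (left right : Int) (n : Nat) :
    rippleStep left right (borrowAt left right n, (left - right) % 2 ^ n) (n : Int)
      = (borrowAt left right (n + 1), (left - right) % 2 ^ (n + 1)) := by
  have hL0 := Int.emod_nonneg left (by positivity : (2:Int) ^ n ≠ 0)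
  have hL1 := Int.emod_lt_of_pos left (by positivity : (0:Int) < 2 ^ n)
  have hR0 := Int.emod_nonneg right (by positivity : (2:Int) ^ n ≠ 0)
  have hR1 := Int.emod_lt_of_pos right (by positivity : (0:Int) < 2 ^ n)
  have hb : borrowAt left right n = if left % 2 ^ n < right % 2 ^ n then 1 else 0 := rfl
  have hb' : borrowAt left right (n + 1) =
      if left % 2 ^ n + left / 2 ^ n % 2 * 2 ^ n < right % 2 ^ n + right / 2 ^ n % 2 * 2 ^ n then 1 else 0 := by
    rw [borrowAt, emod_pow_succ, emod_pow_succ]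
  have ho' : (left - right) % 2 ^ (n + 1) = left % 2 ^ n + left / 2 ^ n % 2 * 2 ^ n
      - (right % 2 ^ n + right / 2 ^ n % 2 * 2 ^ n) + borrowAt left right (n + 1) * 2 ^ (n + 1) := by
    rw [emod_sub_char, emod_pow_succ, emod_pow_succ]
  rw [rippleStep]
  simp only [Int.toNat_natCast, Int.shiftRight_eq_div_pow, PySem.Int.band_one,
    PySem.Int.mod_eq_emod_of_pos (by norm_num : (0:Int) < 2), Nat.cast_pow, Nat.cast_ofNat]
  rw [ho', hb', emod_sub_char left right n, hb]
  rcases Int.emod_two_eq (left / 2 ^ n) with hlb | hlb <;>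
      rcases Int.emod_two_eq (right / 2 ^ n) with hrb | hrb <;>
      by_cases hLR : left % 2 ^ n < right % 2 ^ n <;> rw [hlb, hrb]
  · -- lb=0 rb=0 borrow=1
    rw [if_pos hLR]
    rw [show PySem.Int.bor (PySem.Int.band (1 - 0) (PySem.Int.bor 0 1)) (PySem.Int.band 0 1) = (1:Int) from by decide]
    rw [show PySem.Int.bxor (PySem.Int.bxor (0:Int) 0) 1 = (1:Int) from by decide]
    rw [show ((1:Int) <<< n) = 2 ^ n from by simp [Int.shiftLeft_eq], int_bor_two_pow _ n (by omega) (by omega)]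
    rw [if_pos (by omega : (left % 2 ^ n + 0 * 2 ^ n < right % 2 ^ n + 0 * 2 ^ n))]
    simp only [Prod.mk.injEq]
    exact ⟨by norm_num, by rw [pow_succ]; ring_nf; try omega⟩
  · -- lb=0 rb=0 borrow=0
    rw [if_neg hLR]
    rw [show PySem.Int.bor (PySem.Int.band (1 - 0) (PySem.Int.bor 0 0)) (PySem.Int.band 0 0) = (0:Int) from by decide]
    rw [show PySem.Int.bxor (PySem.Int.bxor (0:Int) 0) 0 = (0:Int) from by decide]
    rw [show ((0:Int) <<< n) = 0 from by simp, PySem.Int.bor_zero]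
    rw [if_neg (by omega : ¬(left % 2 ^ n + 0 * 2 ^ n < right % 2 ^ n + 0 * 2 ^ n))]
    simp only [Prod.mk.injEq]
    exact ⟨by norm_num, by rw [pow_succ]; ring_nf; try omega⟩
  · -- lb=0 rb=1 borrow=1
    rw [if_pos hLR]
    rw [show PySem.Int.bor (PySem.Int.band (1 - 0) (PySem.Int.bor 1 1)) (PySem.Int.band 1 1) = (1:Int) from by decide]
    rw [show PySem.Int.bxor (PySem.Int.bxor (0:Int) 1) 1 = (0:Int) from by decide]
    rw [show ((0:Int) <<< n) = 0 from by simp, PySem.Int.bor_zero]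
    rw [if_pos (by omega : (left % 2 ^ n + 0 * 2 ^ n < right % 2 ^ n + 1 * 2 ^ n))]
    simp only [Prod.mk.injEq]
    exact ⟨by norm_num, by rw [pow_succ]; ring_nf; try omega⟩
  · -- lb=0 rb=1 borrow=0
    rw [if_neg hLR]
    rw [show PySem.Int.bor (PySem.Int.band (1 - 0) (PySem.Int.bor 1 0)) (PySem.Int.band 1 0) = (1:Int) from by decide]
    rw [show PySem.Int.bxor (PySem.Int.bxor (0:Int) 1) 0 = (1:Int) from by decide]
    rw [show ((1:Int) <<< n) = 2 ^ n from by simp [Int.shiftLeft_eq], int_bor_two_pow _ n (by omega) (by omega)]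
    rw [if_pos (by omega : (left % 2 ^ n + 0 * 2 ^ n < right % 2 ^ n + 1 * 2 ^ n))]
    simp only [Prod.mk.injEq]
    exact ⟨by norm_num, by rw [pow_succ]; ring_nf; try omega⟩
  · -- lb=1 rb=0 borrow=1
    rw [if_pos hLR]
    rw [show PySem.Int.bor (PySem.Int.band (1 - 1) (PySem.Int.bor 0 1)) (PySem.Int.band 0 1) = (0:Int) from by decide]
    rw [show PySem.Int.bxor (PySem.Int.bxor (1:Int) 0) 1 = (0:Int) from by decide]
    rw [show ((0:Int) <<< n) = 0 from by simp, PySem.Int.bor_zero]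
    rw [if_neg (by omega : ¬(left % 2 ^ n + 1 * 2 ^ n < right % 2 ^ n + 0 * 2 ^ n))]
    simp only [Prod.mk.injEq]
    exact ⟨by norm_num, by rw [pow_succ]; ring_nf; try omega⟩
  · -- lb=1 rb=0 borrow=0
    rw [if_neg hLR]
    rw [show PySem.Int.bor (PySem.Int.band (1 - 1) (PySem.Int.bor 0 0)) (PySem.Int.band 0 0) = (0:Int) from by decide]
    rw [show PySem.Int.bxor (PySem.Int.bxor (1:Int) 0) 0 = (1:Int) from by decide]
    rw [show ((1:Int) <<< n) = 2 ^ n from by simp [Int.shiftLeft_eq], int_bor_two_pow _ n (by omega) (by omega)]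
    rw [if_neg (by omega : ¬(left % 2 ^ n + 1 * 2 ^ n < right % 2 ^ n + 0 * 2 ^ n))]
    simp only [Prod.mk.injEq]
    exact ⟨by norm_num, by rw [pow_succ]; ring_nf; try omega⟩
  · -- lb=1 rb=1 borrow=1
    rw [if_pos hLR]
    rw [show PySem.Int.bor (PySem.Int.band (1 - 1) (PySem.Int.bor 1 1)) (PySem.Int.band 1 1) = (1:Int) from by decide]
    rw [show PySem.Int.bxor (PySem.Int.bxor (1:Int) 1) 1 = (1:Int) from by decide]
    rw [show ((1:Int) <<< n) = 2 ^ n from by simp [Int.shiftLeft_eq], int_bor_two_pow _ n (by omega) (by omega)]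
    rw [if_pos (by omega : (left % 2 ^ n + 1 * 2 ^ n < right % 2 ^ n + 1 * 2 ^ n))]
    simp only [Prod.mk.injEq]
    exact ⟨by norm_num, by rw [pow_succ]; ring_nf; try omega⟩
  · -- lb=1 rb=1 borrow=0
    rw [if_neg hLR]
    rw [show PySem.Int.bor (PySem.Int.band (1 - 1) (PySem.Int.bor 1 0)) (PySem.Int.band 1 0) = (0:Int) from by decide]
    rw [show PySem.Int.bxor (PySem.Int.bxor (1:Int) 1) 0 = (0:Int) from by decide]
    rw [show ((0:Int) <<< n) = 0 from by simp, PySem.Int.bor_zero]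
    rw [if_neg (by omega : ¬(left % 2 ^ n + 1 * 2 ^ n < right % 2 ^ n + 1 * 2 ^ n))]
    simp only [Prod.mk.injEq]
    exact ⟨by norm_num, by rw [pow_succ]; ring_nf; try omega⟩

-- loop invariant: after the low n bits, the state is (borrow, (left - right) mod 2^n)
theorem fold_invariant (left right : Int) (n : Nat) :
    (PySem.List.pyRange 0 (n : Int) 1).foldl (rippleStep left right) (0, 0)
      = (borrowAt left right n, (left - right) % 2 ^ n) := by
  induction n with
  | zero =>
    simp [PySem.List.pyRange_one_eq_nil (by norm_num : (0 : Int) ≤ 0), borrowAt]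
  | succ n ih =>
    have hcast : ((n : Int) + 1) = ((n + 1 : Nat) : Int) := by push_cast; ring
    rw [← hcast, PySem.List.pyRange_one_succ_right (by positivity), List.foldl_append, ih]
    simp only [List.foldl_cons, List.foldl_nil]
    exact step_closed left right n

-- ===== VERDICT (by name: the statement is the Claim_ definition above) =====
theorem bit_ripple_sub_py_spec : Claim_equal_bit_ripple_sub_py := by
  intro width left right _ hpre
  unfold Spec_bit_ripple_sub_py bit_ripple_sub_py bit_ripple_sub_py_alt
  have hw : ((width.toNat : Int)) = width := Int.toNat_of_nonneg hpre
  rw [← hw]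
  simp only [Int.toNat_natCast]
  rw [fold_invariant]
  have hsl : ((1:Int) <<< width.toNat) = 2 ^ width.toNat := by simp [Int.shiftLeft_eq]
  rw [hsl, PySem.Int.mod_eq_emod_of_pos (by positivity)]
  exact int_band_mask _ _  (Int.emod_nonneg _ (by positivity)) (Int.emod_lt_of_pos _ (by positivity))
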